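-- pv_equiv track=rewrite | github.com/sachaheroux/interface_backend | johnson_modifie.py | generate_sub_problems
-- ===== SOURCE A (Python) =====
-- from typing import List, Tuple
--
-- def generate_sub_problems(tasks: List[List[int]]) -> List[Tuple[List[float], List[float]]]:
--     num_machines = len(tasks[0])
--     sub_problems = []
--
--     for i in range(1, num_machines):
--         pseudo_machine_1 = [sum(job[:i]) for job in tasks]
--         pseudo_machine_2 = [sum(job[-i:]) for job in tasks]
--         sub_problems.append((pseudo_machine_1, pseudo_machine_2))
--
--     return sub_problems
-- ===== SOURCE B (Python) =====
-- from typing import List, Tuple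
--
-- def generate_sub_problems(tasks: List[List[int]]) -> List[Tuple[List[float], List[float]]]:
--     num_machines = len(tasks[0])
--     prefixes = []
--     for job in tasks:
--         p = [0]
--         for x in job:
--             p.append(p[-1] + x)
--         prefixes.append(p)
--     sub_problems = []
--     for i in range(1, num_machines):
--         m1 = [p[min(i, len(p) - 1)] for p in prefixes]
--         m2 = [p[-1] - p[max(len(p) - 1 - i, 0)] for p in prefixes]
--         sub_problems.append((m1, m2))
--     return sub_problems
-- ===== Notes on version B (the rewrite author's own statement) =====
-- stated objective: faster
-- what changed: B builds one prefix-sum table per job once, then answers every machine split with O(1) table lookups instead of re-summing job[:i] and job[-i:] for each i.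
-- outside the precondition, e.g. on generate_sub_problems([]): A raises IndexError, B raises IndexError
import Mathlib
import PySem

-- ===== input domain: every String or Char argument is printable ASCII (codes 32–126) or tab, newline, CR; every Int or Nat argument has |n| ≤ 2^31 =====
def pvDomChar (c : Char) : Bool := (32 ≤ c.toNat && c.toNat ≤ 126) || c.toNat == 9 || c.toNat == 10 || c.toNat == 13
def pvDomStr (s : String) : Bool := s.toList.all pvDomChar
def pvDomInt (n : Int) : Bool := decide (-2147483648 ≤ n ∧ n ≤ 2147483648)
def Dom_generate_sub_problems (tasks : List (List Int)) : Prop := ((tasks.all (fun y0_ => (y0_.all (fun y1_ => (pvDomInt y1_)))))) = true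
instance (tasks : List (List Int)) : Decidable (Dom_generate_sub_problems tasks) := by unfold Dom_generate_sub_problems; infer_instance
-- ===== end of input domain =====

-- B replaces A's per-split re-summation of job[:i] and job[-i:] by one prefix-sum table per job,
-- turning each split into O(1) lookups (objective: faster, O(m^2*n) → O(m*n)).

-- ===== PORT A =====
-- for i in range(1, num_machines): sum(job[:i]), sum(job[-i:]) recomputed per split
def generate_sub_problems (tasks : List (List Int)) : List (List Int × List Int) :=
  let num_machines : Int := (tasks.headD []).length
  (PySem.List.pyRange 1 num_machines 1).map (fun i =>
    (tasks.map (fun job => (PySem.List.slice job none (some i)).sum),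
     tasks.map (fun job => (PySem.List.slice job (some (-i)) none).sum)))

-- ===== PORT B =====
-- p = [0]; for x in job: p.append(p[-1] + x)
def gsp_prefix (job : List Int) : List Int :=
  job.foldl (fun p x => p ++ [p.getLastD 0 + x]) [0]

def generate_sub_problems_alt (tasks : List (List Int)) : List (List Int × List Int) :=
  let prefixes := tasks.map gsp_prefix
  let num_machines : Int := (tasks.headD []).length
  (PySem.List.pyRange 1 num_machines 1).map (fun i =>
    (prefixes.map (fun p => p.getD (min i.toNat (p.length - 1)) 0),
     prefixes.map (fun p => p.getD (p.length - 1) 0 - p.getD (p.length - 1 - i.toNat) 0)))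

-- ===== PRECONDITION & SPEC =====
-- Pre_ excludes only tasks = [], on which A raises IndexError at tasks[0] (B raises there too).
def Pre_generate_sub_problems (tasks : List (List Int)) : Prop := tasks ≠ []
instance (tasks : List (List Int)) : Decidable (Pre_generate_sub_problems tasks) := by unfold Pre_generate_sub_problems; infer_instance
def pvWitness_generate_sub_problems : List (List Int) := [[1, 2], [3, 4]]

def Spec_generate_sub_problems (tasks : List (List Int)) (out : List (List Int × List Int)) : Prop := out = generate_sub_problems_alt tasks
instance (tasks : List (List Int)) (out : List (List Int × List Int)) : Decidable (Spec_generate_sub_problems tasks out) := by unfold Spec_generate_sub_problems; infer_instance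

-- ===== CLAIM (what is proved, stated in full; the proofs are below) =====
def Claim_equal_generate_sub_problems : Prop := ∀ (tasks : List (List Int)), Dom_generate_sub_problems tasks → Pre_generate_sub_problems tasks → Spec_generate_sub_problems tasks (generate_sub_problems tasks)

-- ===== LEMMAS AND PROOFS =====

-- running suffix of the prefix-sum table built after seed value s
def gsp_tail (s : Int) : List Int → List Int
  | [] => []
  | x :: xs => (s + x) :: gsp_tail (s + x) xs

theorem gsp_foldl_eq (job : List Int) : ∀ (p : List Int),
    job.foldl (fun p x => p ++ [p.getLastD 0 + x]) p = p ++ gsp_tail (p.getLastD 0) job := by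
  induction job with
  | nil => intro p; simp [gsp_tail]
  | cons x xs ih =>
    intro p
    simp only [List.foldl_cons, gsp_tail, ih (p ++ [p.getLastD 0 + x])]
    simp

theorem gsp_prefix_eq (job : List Int) : gsp_prefix job = 0 :: gsp_tail 0 job := by
  simpa [gsp_prefix] using gsp_foldl_eq job [0]

theorem gsp_tail_length (job : List Int) : ∀ s, (gsp_tail s job).length = job.length := by
  induction job with
  | nil => intro s; rfl
  | cons x xs ih => intro s; simp [gsp_tail, ih]

theorem gsp_tail_getD (job : List Int) : ∀ (s : Int) (k : Nat), k < job.length →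
    (gsp_tail s job).getD k 0 = s + (job.take (k + 1)).sum := by
  induction job with
  | nil => intro s k h; simp at h
  | cons x xs ih =>
    intro s k h
    cases k with
    | zero => simp [gsp_tail]
    | succ k =>
      simp only [gsp_tail, List.getD_cons_succ, List.take_succ_cons, List.sum_cons]
      rw [ih (s + x) k (by simpa using h)]
      ring

theorem gsp_prefix_length (job : List Int) : (gsp_prefix job).length = job.length + 1 := by
  simp [gsp_prefix_eq, gsp_tail_length]

theorem gsp_prefix_getD (job : List Int) (k : Nat) (h : k ≤ job.length) :
    (gsp_prefix job).getD k 0 = (job.take k).sum := by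
  rw [gsp_prefix_eq]
  cases k with
  | zero => simp
  | succ k =>
    simp only [List.getD_cons_succ]
    rw [gsp_tail_getD job 0 k (by omega)]
    simp

theorem sum_drop_eq (job : List Int) (m : Nat) :
    (job.drop m).sum = job.sum - (job.take m).sum := by
  have h := congrArg List.sum (List.take_append_drop m job)
  simp only [List.sum_append] at h
  omega

theorem per_job_fst (job : List Int) (k : Nat) :
    (PySem.List.slice job none (some (k : Int))).sum
      = (gsp_prefix job).getD (min (k : Int).toNat ((gsp_prefix job).length - 1)) 0 := by
  rw [PySem.List.slice_to_natCast, gsp_prefix_length, Int.toNat_natCast, Nat.add_sub_cancel,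
    gsp_prefix_getD job (min k job.length) (by omega)]
  congr 1
  rw [List.take_eq_take_iff]
  omega

theorem per_job_snd (job : List Int) (k : Nat) (hk : 0 < k) :
    (PySem.List.slice job (some (-(k : Int))) none).sum
      = (gsp_prefix job).getD ((gsp_prefix job).length - 1) 0
        - (gsp_prefix job).getD ((gsp_prefix job).length - 1 - (k : Int).toNat) 0 := by
  rw [PySem.List.slice_from_neg_natCast job k hk, gsp_prefix_length, Nat.add_sub_cancel]
  simp only [Int.toNat_natCast]
  rw [gsp_prefix_getD job job.length (le_refl _),
    gsp_prefix_getD job (job.length - k) (by omega),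
    List.take_length, sum_drop_eq]

-- ===== VERDICT (by name: the statement is the Claim_ definition above) =====
theorem generate_sub_problems_spec : Claim_equal_generate_sub_problems := by
  intro tasks _ _
  unfold Spec_generate_sub_problems generate_sub_problems generate_sub_problems_alt
  simp only [List.map_map]
  apply List.map_congr_left
  intro i hi
  have h1 : (1 : Int) ≤ i := (PySem.List.mem_pyRange_one.mp hi).1
  have hk : i = ((i.toNat : Nat) : Int) := by omega
  congr 1
  · apply List.map_congr_left
    intro job _
    rw [hk]
    exact per_job_fst job i.toNat
  · apply List.map_congr_left
    intro job _
    have := per_job_snd job i.toNat (by omega)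
    rw [hk]
    simpa using this
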